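-- pv_equiv track=rewrite | github.com/GoldenKoopa/Advent-of-Code | 10/02.py | enlarge_matrix
-- ===== SOURCE A (Python) =====
-- def enlarge_matrix(matrix):
--     new_matrix = [[1 if matrix[y//3][x//3] != 'S' else 0 for x in range(len(matrix[0])*3)] for y in range(len(matrix)*3)]
--     for y in range(len(matrix)):
--         for x in range(len(matrix[0])):
--             if matrix[y][x] == '|':
--                 new_matrix[y * 3 + 1][x * 3 + 1] = 0
--                 new_matrix[y * 3][x * 3 + 1] = 0
--                 new_matrix[y * 3 + 2][x * 3 + 1] = 0
--             elif matrix[y][x] == '-':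
--                 new_matrix[y * 3 + 1][x * 3 + 1] = 0
--                 new_matrix[y * 3 + 1][x * 3 ] = 0
--                 new_matrix[y * 3 + 1][x * 3 + 2] = 0
--             elif matrix[y][x] == 'J':
--                 new_matrix[y * 3 + 1][x * 3 + 1] = 0
--                 new_matrix[y * 3 + 1][x * 3] = 0
--                 new_matrix[y * 3][x * 3 + 1] = 0
--             elif matrix[y][x] == '7':
--                 new_matrix[y * 3 + 1][x * 3 + 1] = 0
--                 new_matrix[y * 3 + 1][x * 3] = 0
--                 new_matrix[y * 3 + 2][x * 3 + 1] = 0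
--             elif matrix[y][x] == 'L':
--                 new_matrix[y * 3 + 1][x * 3 + 1] = 0
--                 new_matrix[y * 3 + 1][x * 3 + 2] = 0
--                 new_matrix[y * 3 ][x * 3 + 1] = 0
--             elif matrix[y][x] == 'F':
--                 new_matrix[y * 3 + 1][x * 3 + 1] = 0
--                 new_matrix[y * 3 + 1][x * 3 + 2] = 0
--                 new_matrix[y * 3 + 2][x * 3 + 1] = 0
--     return new_matrix
-- ===== SOURCE B (Python) =====
-- _BLOCKS = {
--     '|': [[1, 0, 1], [1, 0, 1], [1, 0, 1]],
--     '-': [[1, 1, 1], [0, 0, 0], [1, 1, 1]],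
--     'J': [[1, 0, 1], [0, 0, 1], [1, 1, 1]],
--     '7': [[1, 1, 1], [0, 0, 1], [1, 0, 1]],
--     'L': [[1, 0, 1], [1, 0, 0], [1, 1, 1]],
--     'F': [[1, 1, 1], [1, 0, 0], [1, 0, 1]],
--     'S': [[0, 0, 0], [0, 0, 0], [0, 0, 0]],
-- }
-- _FULL = [[1, 1, 1], [1, 1, 1], [1, 1, 1]]
--
--
-- def enlarge_matrix(matrix):
--     if not matrix:
--         return []
--     w = len(matrix[0])
--     out = []
--     for row in matrix:
--         blocks = [_BLOCKS.get(c, _FULL) for c in row[:w]]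
--         for i in range(3):
--             out.append([v for b in blocks for v in b[i]])
--     return out
-- ===== Notes on version B (the rewrite author's own statement) =====
-- stated objective: simpler
-- what changed: Replaces A's fill-everything-then-patch-with-nested-index-mutation by a per-character 3x3 block table and row-wise concatenation of block rows, with no mutation and no per-cell index arithmetic (measured constant-factor speedup).
import Mathlib
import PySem

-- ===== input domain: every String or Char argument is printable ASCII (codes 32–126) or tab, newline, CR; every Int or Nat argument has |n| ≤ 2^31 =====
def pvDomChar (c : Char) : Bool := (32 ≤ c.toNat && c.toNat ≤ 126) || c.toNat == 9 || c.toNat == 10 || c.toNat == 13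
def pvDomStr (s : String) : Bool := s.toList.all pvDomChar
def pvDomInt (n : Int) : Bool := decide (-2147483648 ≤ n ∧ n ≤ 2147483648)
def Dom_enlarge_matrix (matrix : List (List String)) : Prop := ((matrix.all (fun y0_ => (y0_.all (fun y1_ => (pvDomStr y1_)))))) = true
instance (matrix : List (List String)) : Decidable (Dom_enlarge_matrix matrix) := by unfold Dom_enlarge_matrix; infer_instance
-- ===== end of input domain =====

-- B replaces A's fill-then-patch (comprehension + nested mutation loop) with a per-character
-- 3x3 block table and row-wise concatenation (objective: simpler decomposition, same cost).

-- ===== PORT A =====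
-- the initial comprehension: new_matrix[y][x] = 1 unless the source cell is 'S'
def pvFill (matrix : List (List String)) (w : Nat) : List (List Int) :=
  (List.range (matrix.length * 3)).map (fun y =>
    (List.range (w * 3)).map (fun x =>
      if (matrix.getD (y / 3) []).getD (x / 3) "" ≠ "S" then (1 : Int) else 0))

-- new_matrix[r][c] = 0  (Python writes only 0 in the patch loop)
def pvSet2 (nm : List (List Int)) (r c : Nat) : List (List Int) :=
  nm.modify r (fun row => row.set c 0)

-- the body of the nested patch loop, branch for branch
def pvPatchCell (ch : String) (y x : Nat) (nm : List (List Int)) : List (List Int) :=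
  if ch = "|" then pvSet2 (pvSet2 (pvSet2 nm (y*3+1) (x*3+1)) (y*3) (x*3+1)) (y*3+2) (x*3+1)
  else if ch = "-" then pvSet2 (pvSet2 (pvSet2 nm (y*3+1) (x*3+1)) (y*3+1) (x*3)) (y*3+1) (x*3+2)
  else if ch = "J" then pvSet2 (pvSet2 (pvSet2 nm (y*3+1) (x*3+1)) (y*3+1) (x*3)) (y*3) (x*3+1)
  else if ch = "7" then pvSet2 (pvSet2 (pvSet2 nm (y*3+1) (x*3+1)) (y*3+1) (x*3)) (y*3+2) (x*3+1)
  else if ch = "L" then pvSet2 (pvSet2 (pvSet2 nm (y*3+1) (x*3+1)) (y*3+1) (x*3+2)) (y*3) (x*3+1)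
  else if ch = "F" then pvSet2 (pvSet2 (pvSet2 nm (y*3+1) (x*3+1)) (y*3+1) (x*3+2)) (y*3+2) (x*3+1)
  else nm

def enlarge_matrix (matrix : List (List String)) : List (List Int) :=
  let w := (matrix.headD []).length
  (List.range matrix.length).foldl
    (fun nm y =>
      (List.range w).foldl
        (fun nm x => pvPatchCell ((matrix.getD y []).getD x "") y x nm) nm)
    (pvFill matrix w)

-- ===== PORT B =====
-- _BLOCKS.get(c, _FULL)
def blockOf (ch : String) : List (List Int) :=
  if ch = "|" then [[1,0,1],[1,0,1],[1,0,1]]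
  else if ch = "-" then [[1,1,1],[0,0,0],[1,1,1]]
  else if ch = "J" then [[1,0,1],[0,0,1],[1,1,1]]
  else if ch = "7" then [[1,1,1],[0,0,1],[1,0,1]]
  else if ch = "L" then [[1,0,1],[1,0,0],[1,1,1]]
  else if ch = "F" then [[1,1,1],[1,0,0],[1,0,1]]
  else if ch = "S" then [[0,0,0],[0,0,0],[0,0,0]]
  else [[1,1,1],[1,1,1],[1,1,1]]

def enlarge_matrix_alt (matrix : List (List String)) : List (List Int) :=
  match matrix with
  | [] => []
  | r0 :: _ =>
    matrix.flatMap (fun row =>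
      let blocks := (row.take r0.length).map blockOf
      (List.range 3).map (fun i => blocks.flatMap (fun b => b.getD i [])))

-- ===== PRECONDITION & SPEC =====
-- Pre_ excludes ragged matrices whose later rows are shorter than the first row:
-- there A raises IndexError (matrix[y][x] / matrix[y//3][x//3] out of range).
def Pre_enlarge_matrix (matrix : List (List String)) : Prop :=
  ∀ row ∈ matrix, (matrix.headD []).length ≤ row.length

instance (matrix : List (List String)) : Decidable (Pre_enlarge_matrix matrix) := by
  unfold Pre_enlarge_matrix; infer_instance

def pvWitness_enlarge_matrix : List (List String) := [["S", "|"], ["-", "."]]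

def Spec_enlarge_matrix (matrix : List (List String)) (out : List (List Int)) : Prop := out = enlarge_matrix_alt matrix
instance (matrix : List (List String)) (out : List (List Int)) : Decidable (Spec_enlarge_matrix matrix out) := by unfold Spec_enlarge_matrix; infer_instance

-- ===== CLAIM (what is proved, stated in full; the proofs are below) =====
def Claim_equal_enlarge_matrix : Prop := ∀ (matrix : List (List String)), Dom_enlarge_matrix matrix → Pre_enlarge_matrix matrix → Spec_enlarge_matrix matrix (enlarge_matrix matrix)

-- ===== LEMMAS AND PROOFS =====

-- one output line of the fill comprehension, for source row `row`
def lineF (row : List String) (w : Nat) : List Int :=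
  (List.range (w * 3)).map (fun x => if row.getD (x / 3) "" ≠ "S" then (1 : Int) else 0)

-- one line of B's per-row group
def gB (row : List String) (w : Nat) (i : Nat) : List Int :=
  ((row.take w).map blockOf).flatMap (fun b => b.getD i [])

-- triple view of the three output rows belonging to one source row; patch at y = 0
def triPatch (ch : String) (x : Nat) (t : List Int × List Int × List Int) :
    List Int × List Int × List Int :=
  if ch = "|" then (t.1.set (x*3+1) 0, t.2.1.set (x*3+1) 0, t.2.2.set (x*3+1) 0)
  else if ch = "-" then (t.1, ((t.2.1.set (x*3+1) 0).set (x*3) 0).set (x*3+2) 0, t.2.2)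
  else if ch = "J" then (t.1.set (x*3+1) 0, (t.2.1.set (x*3+1) 0).set (x*3) 0, t.2.2)
  else if ch = "7" then (t.1, (t.2.1.set (x*3+1) 0).set (x*3) 0, t.2.2.set (x*3+1) 0)
  else if ch = "L" then (t.1.set (x*3+1) 0, (t.2.1.set (x*3+1) 0).set (x*3+2) 0, t.2.2)
  else if ch = "F" then (t.1, (t.2.1.set (x*3+1) 0).set (x*3+2) 0, t.2.2.set (x*3+1) 0)
  else t

theorem range_mul3_map {a : Type} (n : Nat) (F : Nat -> a) :
    (List.range ((n+1)*3)).map F = [F 0, F 1, F 2] ++ (List.range (n*3)).map (fun y => F (3+y)) := by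
  have h : (n+1)*3 = 3 + n*3 := by omega
  have h3 : List.range 3 = [0,1,2] := by decide
  rw [h, List.range_add, List.map_append, List.map_map, h3]
  simp [Function.comp]

theorem fill_flatMap (matrix : List (List String)) (w : Nat) :
    pvFill matrix w = matrix.flatMap (fun row => [lineF row w, lineF row w, lineF row w]) := by
  induction matrix with
  | nil => simp [pvFill]
  | cons r rest ih =>
    have e3 : ∀ y : Nat, (3 + y) / 3 = y / 3 + 1 := fun y => by omega
    rw [List.flatMap_cons, ← ih]
    simp only [pvFill, List.length_cons]
    rw [range_mul3_map]
    congr 1 <;>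
      first
        | simp [lineF]
        | (apply List.map_congr_left; intro y _; rw [e3, List.getD_cons_succ])

theorem lineF_cons (ch : String) (row : List String) (w : Nat) :
    lineF (ch :: row) (w + 1) =
      (if ch ≠ "S" then ([1,1,1] : List Int) else [0,0,0]) ++ lineF row w := by
  simp only [lineF]
  rw [range_mul3_map]
  congr 1 <;>
    first
      | (by_cases h : ch = "S" <;> simp [h])
      | (apply List.map_congr_left; intro x _;
         rw [show (3 + x) / 3 = x / 3 + 1 from by omega, List.getD_cons_succ])

theorem blockOf_len (ch : String) (i : Nat) (hi : i < 3) : ((blockOf ch).getD i []).length = 3 := by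
  unfold blockOf
  split_ifs <;> (interval_cases i <;> rfl)

-- x-direction: a patch at column block x+1 leaves a length-3 column prefix untouched
theorem triPatch_shift (ch : String) (x : Nat) (a b c g0 g1 g2 : List Int)
    (ha : a.length = 3) (hb : b.length = 3) (hc : c.length = 3) :
    triPatch ch (x + 1) (a ++ g0, b ++ g1, c ++ g2) =
      (a ++ (triPatch ch x (g0, g1, g2)).1,
       b ++ (triPatch ch x (g0, g1, g2)).2.1,
       c ++ (triPatch ch x (g0, g1, g2)).2.2) := by
  have hs : ∀ (p : List Int), p.length = 3 → ∀ (g : List Int) (j : Nat),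
      (p ++ g).set (3 + j) 0 = p ++ g.set j 0 := by
    intro p hp g j
    rw [List.set_append, if_neg (by omega)]
    rw [show 3 + j - p.length = j from by omega]
  have e1 : (x+1)*3+1 = 3+(x*3+1) := by omega
  have e0 : (x+1)*3 = 3+(x*3) := by omega
  have e2 : (x+1)*3+2 = 3+(x*3+2) := by omega
  unfold triPatch
  split_ifs <;> (try simp only [e1, e2]) <;> (try simp only [e0]) <;>
    (try simp only [hs a ha, hs b hb, hs c hc]) <;> try rfl

theorem fold_tri_shift (l : List Nat) (f : Nat -> String) (a b c : List Int)
    (ha : a.length = 3) (hb : b.length = 3) (hc : c.length = 3) (g0 g1 g2 : List Int) :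
    (l.map Nat.succ).foldl (fun t x => triPatch (f x) x t) (a ++ g0, b ++ g1, c ++ g2) =
      (a ++ (l.foldl (fun t x => triPatch (f (x+1)) x t) (g0, g1, g2)).1,
       b ++ (l.foldl (fun t x => triPatch (f (x+1)) x t) (g0, g1, g2)).2.1,
       c ++ (l.foldl (fun t x => triPatch (f (x+1)) x t) (g0, g1, g2)).2.2) := by
  induction l generalizing g0 g1 g2 with
  | nil => simp
  | cons x l ih =>
    simp only [List.map_cons, List.foldl_cons, Nat.succ_eq_add_one]
    rw [triPatch_shift _ _ _ _ _ _ _ _ ha hb hc, ih]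

theorem triPatch_first (ch : String) (g0 g1 g2 : List Int) :
    triPatch ch 0
      ((if ch ≠ "S" then ([1,1,1] : List Int) else [0,0,0]) ++ g0,
       (if ch ≠ "S" then ([1,1,1] : List Int) else [0,0,0]) ++ g1,
       (if ch ≠ "S" then ([1,1,1] : List Int) else [0,0,0]) ++ g2) =
      ((blockOf ch).getD 0 [] ++ g0, (blockOf ch).getD 1 [] ++ g1, (blockOf ch).getD 2 [] ++ g2) := by
  unfold triPatch blockOf
  split_ifs <;> simp_all [List.set_append]

theorem tri_main (row : List String) (w : Nat) (hw : w ≤ row.length) :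
    (List.range w).foldl (fun t x => triPatch (row.getD x "") x t)
      (lineF row w, lineF row w, lineF row w) = (gB row w 0, gB row w 1, gB row w 2) := by
  induction w generalizing row with
  | zero => simp [lineF, gB]
  | succ w ih =>
    cases row with
    | nil => simp at hw
    | cons ch row' =>
      rw [List.range_succ_eq_map, List.foldl_cons, lineF_cons]
      have hstep : triPatch ((ch :: row').getD 0 "") 0
          ((if ch ≠ "S" then ([1,1,1] : List Int) else [0,0,0]) ++ lineF row' w,
           (if ch ≠ "S" then ([1,1,1] : List Int) else [0,0,0]) ++ lineF row' w,
           (if ch ≠ "S" then ([1,1,1] : List Int) else [0,0,0]) ++ lineF row' w) =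
          ((blockOf ch).getD 0 [] ++ lineF row' w,
           (blockOf ch).getD 1 [] ++ lineF row' w,
           (blockOf ch).getD 2 [] ++ lineF row' w) := by
        rw [List.getD_cons_zero]; exact triPatch_first ch _ _ _
      rw [hstep,
        fold_tri_shift _ _ _ _ _ (blockOf_len ch 0 (by omega)) (blockOf_len ch 1 (by omega))
          (blockOf_len ch 2 (by omega))]
      have hfun : (fun (t : List Int × List Int × List Int) x =>
            triPatch ((ch :: row').getD (x+1) "") x t) =
          (fun t x => triPatch (row'.getD x "") x t) := by
        funext t x
        rw [List.getD_cons_succ]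
      rw [hfun, ih row' (by simpa using hw)]
      simp [gB, List.take_succ_cons]

-- y = 0 patch on a 3-row prefix, in cons form
theorem patchCell_tri (ch : String) (x : Nat) (a b c : List Int) (t : List (List Int)) :
    pvPatchCell ch 0 x (a :: b :: c :: t) =
      (triPatch ch x (a, b, c)).1 :: (triPatch ch x (a, b, c)).2.1 ::
        (triPatch ch x (a, b, c)).2.2 :: t := by
  unfold pvPatchCell triPatch pvSet2
  split_ifs <;>
    simp [List.modify_succ_cons, List.modify_zero_cons]

theorem fold_patch_tri (l : List Nat) (f : Nat -> String) (a b c : List Int) (t : List (List Int)) :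
    l.foldl (fun nm x => pvPatchCell (f x) 0 x nm) (a :: b :: c :: t) =
      (l.foldl (fun p x => triPatch (f x) x p) (a, b, c)).1 ::
        (l.foldl (fun p x => triPatch (f x) x p) (a, b, c)).2.1 ::
        (l.foldl (fun p x => triPatch (f x) x p) (a, b, c)).2.2 :: t := by
  induction l generalizing a b c with
  | nil => simp
  | cons x l ih =>
    simp only [List.foldl_cons]
    rw [patchCell_tri, ih]

-- a patch at source row y+1 leaves a 3-row prefix untouched
theorem patchCell_shift (ch : String) (y x : Nat) (a b c : List Int) (t : List (List Int)) :
    pvPatchCell ch (y + 1) x (a :: b :: c :: t) = a :: b :: c :: pvPatchCell ch y x t := by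
  have hm : ∀ (t : List (List Int)) (j : Nat) (f : List Int -> List Int),
      (a :: b :: c :: t).modify (3 + j) f = a :: b :: c :: t.modify j f := by
    intro t j f
    have e : 3 + j = (j + 1 + 1) + 1 := by omega
    rw [e, List.modify_succ_cons, List.modify_succ_cons, List.modify_succ_cons]
  have e1 : (y+1)*3+1 = 3+(y*3+1) := by omega
  have e0 : (y+1)*3 = 3+(y*3) := by omega
  have e2 : (y+1)*3+2 = 3+(y*3+2) := by omega
  unfold pvPatchCell pvSet2
  split_ifs <;> (try simp only [e1, e2]) <;> (try simp only [e0]) <;>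
    (try simp only [hm]) <;> try rfl

theorem fold_patch_shift (l : List Nat) (f : Nat -> String) (y : Nat)
    (a b c : List Int) (t : List (List Int)) :
    l.foldl (fun nm x => pvPatchCell (f x) (y + 1) x nm) (a :: b :: c :: t) =
      a :: b :: c :: l.foldl (fun nm x => pvPatchCell (f x) y x nm) t := by
  induction l generalizing t with
  | nil => simp
  | cons x l ih =>
    simp only [List.foldl_cons]
    rw [patchCell_shift, ih]

theorem outer_shift (l : List Nat) (w : Nat) (row : List String) (rest : List (List String))
    (a b c : List Int) (t : List (List Int)) :
    (l.map Nat.succ).foldl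
        (fun nm y => (List.range w).foldl
          (fun nm x => pvPatchCell (((row :: rest).getD y []).getD x "") y x nm) nm)
        (a :: b :: c :: t) =
      a :: b :: c :: l.foldl
        (fun nm y => (List.range w).foldl
          (fun nm x => pvPatchCell ((rest.getD y []).getD x "") y x nm) nm) t := by
  induction l generalizing t with
  | nil => simp
  | cons y l ih =>
    simp only [List.map_cons, List.foldl_cons, Nat.succ_eq_add_one, List.getD_cons_succ]
    rw [fold_patch_shift, ih]

theorem core_main (matrix : List (List String)) (w : Nat)
    (h : ∀ row ∈ matrix, w ≤ row.length) :
    (List.range matrix.length).foldl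
        (fun nm y => (List.range w).foldl
          (fun nm x => pvPatchCell ((matrix.getD y []).getD x "") y x nm) nm)
        (matrix.flatMap (fun row => [lineF row w, lineF row w, lineF row w])) =
      matrix.flatMap (fun row => [gB row w 0, gB row w 1, gB row w 2]) := by
  induction matrix with
  | nil => simp
  | cons row rest ih =>
    simp only [List.flatMap_cons, List.length_cons, List.cons_append, List.nil_append]
    rw [List.range_succ_eq_map, List.foldl_cons]
    simp only [List.getD_cons_zero]
    rw [fold_patch_tri, tri_main row w (h row (by simp)), outer_shift,
      ih (fun r hr => h r (by simp [hr]))]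

-- ===== VERDICT (by name: the statement is the Claim_ definition above) =====
theorem enlarge_matrix_spec : Claim_equal_enlarge_matrix := by
  intro matrix dom pre
  unfold Spec_enlarge_matrix
  cases matrix with
  | nil => rfl
  | cons r0 rest =>
    have hpre : ∀ row ∈ r0 :: rest, r0.length ≤ row.length := by
      intro row hr
      simpa using pre row hr
    show (List.range (r0 :: rest).length).foldl _ (pvFill (r0 :: rest) ((r0 :: rest).headD []).length)
        = enlarge_matrix_alt (r0 :: rest)
    rw [show ((r0 :: rest).headD []).length = r0.length from rfl]
    rw [fill_flatMap, core_main _ _ hpre]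
    unfold enlarge_matrix_alt
    have h3 : List.range 3 = [0,1,2] := by decide
    apply Eq.symm
    apply List.flatMap_congr
    intro row _
    rw [h3]
    simp [gB]
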